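-- pv_equiv track=rewrite | github.com/kruemmel-python/NOVA-SYNESIS | src/nova_synesis/planning/lit_planner.py | _insert_missing_object_commas
-- ===== SOURCE A (Python) =====
-- def _insert_missing_object_commas(candidate: str) -> str:
--     result: list[str] = []
--     stack: list[str] = []
--     in_string = False
--     escaped = False
--     quote_char = ""
--
--     def previous_significant() -> str:
--         for item in reversed(result):
--             if not item.isspace():
--                 return item
--         return ""
--
--     def next_significant(index: int) -> str:
--         for item in candidate[index + 1 :]:
--             if not item.isspace():
--                 return item
--         return ""
--
--     for index, character in enumerate(candidate):
--         if in_string: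
--             result.append(character)
--             if escaped:
--                 escaped = False
--             elif character == "\\":
--                 escaped = True
--             elif character == quote_char:
--                 in_string = False
--             continue
--
--         if character in {'"', "'"}:
--             in_string = True
--             quote_char = character
--             result.append(character)
--             continue
--
--         if character == "{":
--             stack.append("{")
--             result.append(character)
--             continue
--         if character == "[":
--             stack.append("[")
--             result.append(character)
--             continue
--         if character in {"}", "]"}:
--             if stack and ((character == "}" and stack[-1] == "{") or (character == "]" and stack[-1] == "[")):
--                 stack.pop()
--             result.append(character)
--             continue
--
--         if character == "\n":
--             prev_sig = previous_significant()
--             next_sig = next_significant(index)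
--             if (
--                 stack
--                 and stack[-1] == "{"
--                 and prev_sig
--                 and prev_sig not in "{[:,"
--                 and next_sig
--                 and next_sig not in "}]"
--                 and (next_sig.isalpha() or next_sig in {'"', "'","_"})
--             ):
--                 result.append(",")
--             result.append(character)
--             continue
--
--         result.append(character)
--
--     return "".join(result)
-- ===== SOURCE B (Python) =====
-- def _insert_missing_object_commas(candidate: str) -> str:
--     n = len(candidate)
--     # backward pass: nxt[i] = first non-space char strictly after index i
--     nxt = [""] * n
--     later = ""
--     for i in range(n - 1, -1, -1):
--         nxt[i] = later
--         if not candidate[i].isspace():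
--             later = candidate[i]
--     # phase 1: decide, per character, whether a comma is inserted before it
--     marks: list[bool] = []
--     stack: list[str] = []
--     in_string = False
--     escaped = False
--     quote = ""
--     prev = ""  # last non-space char of the output so far, tracked incrementally
--     for i, ch in enumerate(candidate):
--         mark = False
--         if in_string:
--             if not ch.isspace():
--                 prev = ch
--             if escaped:
--                 escaped = False
--             elif ch == "\\":
--                 escaped = True
--             elif ch == quote:
--                 in_string = False
--         elif ch in '"\'':
--             in_string = True
--             quote = ch
--             prev = ch
--         elif ch in "{[":
--             stack.append(ch)
--             prev = ch
--         elif ch in "}]":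
--             if stack and stack[-1] == ("{" if ch == "}" else "["):
--                 stack.pop()
--             prev = ch
--         elif ch == "\n":
--             ns = nxt[i]
--             if (stack and stack[-1] == "{" and prev and prev not in "{[:,"
--                     and ns and ns not in "}]"
--                     and (ns.isalpha() or ns in '"\'_')):
--                 mark = True
--                 prev = ","
--         elif not ch.isspace():
--             prev = ch
--         marks.append(mark)
--     # phase 2: render the output from the original text and the mark flags
--     return "".join("," + ch if m else ch for ch, m in zip(candidate, marks))
-- ===== Notes on version B (the rewrite author's own statement) =====
-- stated objective: alternative
-- what changed: Replaces A's accumulate-and-rescan single pass (per-newline backward scan of the emitted output and forward scan of the input) by two staged linear passes: a decision pass that emits one comma-mark flag per character, using a precomputed next-significant suffix table and an incrementally tracked last-significant character, followed by a render pass that zips the text with its marks.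
import Mathlib
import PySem

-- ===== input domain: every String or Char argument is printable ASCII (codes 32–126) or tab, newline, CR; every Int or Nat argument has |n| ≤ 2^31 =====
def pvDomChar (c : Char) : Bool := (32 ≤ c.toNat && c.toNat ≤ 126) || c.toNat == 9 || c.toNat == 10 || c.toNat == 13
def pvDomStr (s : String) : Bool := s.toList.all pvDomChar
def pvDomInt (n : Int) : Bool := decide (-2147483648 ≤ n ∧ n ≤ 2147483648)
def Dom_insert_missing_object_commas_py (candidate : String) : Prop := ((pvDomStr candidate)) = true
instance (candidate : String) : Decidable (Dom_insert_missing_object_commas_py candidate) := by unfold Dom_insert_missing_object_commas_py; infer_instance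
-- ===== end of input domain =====

-- ===== PORT A =====
-- B replaces A's accumulate-and-rescan single pass (per-newline backward scan of the
-- emitted output, forward scan of the input) by two staged linear passes: a decision
-- pass producing one mark flag per character (with a precomputed next-significant
-- table and an incrementally tracked last-significant char), then a render pass.

-- Python str.isspace, exact on the ASCII domain (Dom excludes \x0b/\x0c and non-ASCII)
def pyIsSpace (c : Char) : Bool :=
  c = ' ' || c = '\t' || c = '\n' || c = '\r'

-- Python str.isalpha for a single char, exact on ASCII
def pyIsAlpha (c : Char) : Bool :=
  ('a' ≤ c && c ≤ 'z') || ('A' ≤ c && c ≤ 'Z')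

-- A's previous_significant: scan reversed(result); result is kept reversed (head = last appended)
def prevSigA : List Char → Option Char
  | [] => none
  | c :: rest => if pyIsSpace c then prevSigA rest else some c

-- A's next_significant: scan candidate[index+1:], i.e. the remaining characters
def nextSigA : List Char → Option Char
  | [] => none
  | c :: rest => if pyIsSpace c then nextSigA rest else some c

-- A's newline-insertion condition, written as A writes it
def commaCond (stack : List Char) (prev next : Option Char) : Bool :=
  match stack, prev, next with
  | t :: _, some p, some nx =>
      t = '{' && !(p = '{' || p = '[' || p = ':' || p = ',') &&
      !(nx = '}' || nx = ']') &&
      (pyIsAlpha nx || nx = '"' || nx = '\'' || nx = '_')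
  | _, _, _ => false

-- A's main loop; resRev is `result` reversed, stack top at head, q is quote_char
def loopA : List Char → List Char → List Char → Bool → Bool → Char → List Char
  | [], resRev, _, _, _, _ => resRev
  | c :: rest, resRev, stack, inStr, esc, q =>
    if inStr then
      let r := c :: resRev
      if esc then loopA rest r stack true false q
      else if c = '\\' then loopA rest r stack true true q
      else if c = q then loopA rest r stack false esc q
      else loopA rest r stack true esc q
    else if c = '"' || c = '\'' then loopA rest (c :: resRev) stack true esc c
    else if c = '{' then loopA rest (c :: resRev) ('{' :: stack) false esc q
    else if c = '[' then loopA rest (c :: resRev) ('[' :: stack) false esc q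
    else if c = '}' || c = ']' then
      let st := match stack with
        | t :: ts => if (c = '}' && t = '{') || (c = ']' && t = '[') then ts else stack
        | [] => stack
      loopA rest (c :: resRev) st false esc q
    else if c = '\n' then
      if commaCond stack (prevSigA resRev) (nextSigA rest) then
        loopA rest (c :: ',' :: resRev) stack false esc q
      else
        loopA rest (c :: resRev) stack false esc q
    else loopA rest (c :: resRev) stack false esc q

def insert_missing_object_commas_py (candidate : String) : String :=
  String.ofList (loopA candidate.toList [] [] false false ' ').reverse

-- ===== PORT B =====
-- B's backward pass: nxt[i] = first significant char strictly after i (and the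
-- running `later`, the first significant char of the whole list)
def buildNxt : List Char → List (Option Char) × Option Char
  | [] => ([], none)
  | c :: rest =>
    let (arr, later) := buildNxt rest
    (later :: arr, if pyIsSpace c then later else some c)

-- B's newline condition, written over the tracked state
def needComma (stack : List Char) (prev ns : Option Char) : Bool :=
  match stack.head?, prev, ns with
  | some t, some p, some x =>
      t = '{' && !(['{', '[', ':', ','].contains p) &&
      !(['}', ']'].contains x) && (pyIsAlpha x || ['"', '\'', '_'].contains x)
  | _, _, _ => false

-- B's decision pass: one Bool per input char (comma inserted before it?); no output
-- text is accumulated, the nxt table is consumed in lockstep, prev tracked incrementally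
def marksB : List Char → List (Option Char) → List Char → Bool → Bool → Char → Option Char → List Bool
  | [], _, _, _, _, _, _ => []
  | c :: rest, nxts, stack, inStr, esc, q, prev =>
    let ns := nxts.headD none
    let nxts' := nxts.tail
    if inStr then
      let p := if pyIsSpace c then prev else some c
      if esc then false :: marksB rest nxts' stack true false q p
      else if c = '\\' then false :: marksB rest nxts' stack true true q p
      else if c = q then false :: marksB rest nxts' stack false esc q p
      else false :: marksB rest nxts' stack true esc q p
    else if c = '"' || c = '\'' then false :: marksB rest nxts' stack true esc c (some c)
    else if c = '{' || c = '[' then false :: marksB rest nxts' (c :: stack) false esc q (some c)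
    else if c = '}' || c = ']' then
      let st := match stack with
        | t :: ts => if t = (if c = '}' then '{' else '[') then ts else stack
        | [] => stack
      false :: marksB rest nxts' st false esc q (some c)
    else if c = '\n' then
      if needComma stack prev ns then
        true :: marksB rest nxts' stack false esc q (some ',')
      else
        false :: marksB rest nxts' stack false esc q prev
    else
      false :: marksB rest nxts' stack false esc q (if pyIsSpace c then prev else some c)

-- B's render pass: zip the original text with its mark flags
def render : List Char → List Bool → List Char
  | c :: cs, m :: ms => (if m then [',', c] else [c]) ++ render cs ms
  | _, _ => []

def insert_missing_object_commas_py_alt (candidate : String) : String :=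
  String.ofList (render candidate.toList
    (marksB candidate.toList (buildNxt candidate.toList).1 [] false false ' ' none))

-- ===== PRECONDITION & SPEC =====
def Spec_insert_missing_object_commas_py (candidate : String) (out : String) : Prop := out = insert_missing_object_commas_py_alt candidate
instance (candidate : String) (out : String) : Decidable (Spec_insert_missing_object_commas_py candidate out) := by unfold Spec_insert_missing_object_commas_py; infer_instance

-- ===== CLAIM (what is proved, stated in full; the proofs are below) =====
def Claim_equal_insert_missing_object_commas_py : Prop := ∀ (candidate : String), Dom_insert_missing_object_commas_py candidate → Spec_insert_missing_object_commas_py candidate (insert_missing_object_commas_py candidate)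

-- ===== LEMMAS AND PROOFS =====

-- the running `later` of the backward pass is exactly A's next_significant helper
theorem buildNxt_snd (l : List Char) : (buildNxt l).2 = nextSigA l := by
  induction l with
  | nil => rfl
  | cons c rest ih => simp [buildNxt, nextSigA, ih]

-- B's condition equals A's condition
theorem needComma_eq (stack : List Char) (prev ns : Option Char) :
    needComma stack prev ns = commaCond stack prev ns := by
  cases stack <;> cases prev <;> cases ns <;>
    simp only [needComma, commaCond, List.head?, List.contains_cons,
      List.contains_nil, Bool.or_false, Bool.beq_eq_decide_eq, Bool.or_assoc, Bool.and_assoc]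

-- the decision pass followed by render reconstructs A's accumulated output
set_option maxHeartbeats 1600000 in
theorem loopA_eq (l : List Char) : ∀ (resRev stack : List Char) (inStr esc : Bool) (q : Char),
    loopA l resRev stack inStr esc q =
    (render l (marksB l (buildNxt l).1 stack inStr esc q (prevSigA resRev))).reverse ++ resRev := by
  induction l with
  | nil => intro resRev stack inStr esc q; simp [loopA, render]
  | cons c rest ih =>
    intro resRev stack inStr esc q
    have hb1 : (buildNxt (c :: rest)).1 = nextSigA rest :: (buildNxt rest).1 := by
      simp [buildNxt, buildNxt_snd]
    have key : ∀ (R S S' : List Char) (i e : Bool) (qq : Char) (P : Option Char),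
        P = prevSigA R → S = S' →
        loopA rest R S i e qq =
        (render rest (marksB rest (buildNxt rest).1 S' i e qq P)).reverse ++ R := by
      rintro R S S' i e qq P rfl rfl; exact ih R S i e qq
    rw [hb1]
    simp only [loopA, marksB, List.headD_cons, List.tail_cons, needComma_eq]
    split_ifs with h1 h2 h3 h4 h5 h6 h7 h8 h9 h10 h11 h12 h13 h14 h15 h16 h17 h18 <;>
      simp only [render, if_true, List.reverse_append, List.reverse_cons,
        List.nil_append, List.append_assoc, List.cons_append] <;>
      first
        | (exfalso; simp_all; done)
        | (apply key <;> (first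
            | rfl
            | (simp_all [prevSigA, pyIsSpace]; done)
            | (clear key ih;
               rcases (show c = '"' ∨ c = '\'' ∨ c = '}' ∨ c = ']' by simp_all <;> tauto)
                 with rfl | rfl | rfl | rfl <;> cases stack <;> simp_all [prevSigA, pyIsSpace];
               done)))

-- ===== VERDICT (by name: the statement is the Claim_ definition above) =====
theorem insert_missing_object_commas_py_spec : Claim_equal_insert_missing_object_commas_py := by
  intro candidate _
  unfold Spec_insert_missing_object_commas_py insert_missing_object_commas_py insert_missing_object_commas_py_alt
  rw [loopA_eq]
  simp [prevSigA]
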